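-- pv_equiv track=rewrite | github.com/Snijamudheen/Leetcode_Practice | python/reocurring_numbers_string.py | find_non_repeating_numbers
-- ===== SOURCE A (Python) =====
-- def find_non_repeating_numbers(s):
--     # Step 1: Create an empty dictionary to count digits
--     count = {}
--
--     # Step 2: Go through each character in the string
--     for char in s:
--         # Check if it's a number (0-9)
--         if char.isdigit():
--             # If the number is already in the dictionary, increase its count by 1
--             if char in count:
--                 count[char] += 1
--             # If the number is not in the dictionary, add it with a count of 1
--             else:
--                 count[char] = 1
--
--     # At this point, the dictionary contains the count of each digit
--     # Example: if input is "1234561256", count = {'1': 2, '2': 2, '3': 1, '4': 1, '5': 2, '6': 2}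
--
--     # Step 3: Create an empty list to store numbers that appear only once
--     non_repeating = []
--
--     # Step 4: Go through the count dictionary and find digits that appear only once
--     for char in count:
--         if count[char] == 1:
--             non_repeating.append(char)  # Add the number to the list
--
--     # At this point, non_repeating contains only the numbers that appeared exactly once
--     # Example: if input is "1234561256", non_repeating = ['3', '4']
--
--     # Step 5: Return the list of non-repeating numbers
--     return non_repeating
-- ===== SOURCE B (Python) =====
-- def find_non_repeating_numbers(s):
--     # Streaming candidate list: no count table at all. 'once' holds digits seen
--     # exactly once so far (first-appearance order); on a second sighting the
--     # digit moves to 'repeated' and is dropped from the candidates forever.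
--     once = []
--     repeated = set()
--     for c in s:
--         if c.isdigit() and c not in repeated:
--             if c in once:
--                 once.remove(c)
--                 repeated.add(c)
--             else:
--                 once.append(c)
--     return once
-- ===== Notes on version B (the rewrite author's own statement) =====
-- stated objective: alternative
-- what changed: Replaces A's count-table-then-second-pass with a single streaming pass that keeps no counts at all: a candidate list of digits seen exactly one time (first-appearance order) plus a set of retired digits; a digit is appended on first sighting, removed from the candidates and retired on its second sighting, and ignored afterwards, so the candidate list is the answer when the pass ends.
import Mathlib
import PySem

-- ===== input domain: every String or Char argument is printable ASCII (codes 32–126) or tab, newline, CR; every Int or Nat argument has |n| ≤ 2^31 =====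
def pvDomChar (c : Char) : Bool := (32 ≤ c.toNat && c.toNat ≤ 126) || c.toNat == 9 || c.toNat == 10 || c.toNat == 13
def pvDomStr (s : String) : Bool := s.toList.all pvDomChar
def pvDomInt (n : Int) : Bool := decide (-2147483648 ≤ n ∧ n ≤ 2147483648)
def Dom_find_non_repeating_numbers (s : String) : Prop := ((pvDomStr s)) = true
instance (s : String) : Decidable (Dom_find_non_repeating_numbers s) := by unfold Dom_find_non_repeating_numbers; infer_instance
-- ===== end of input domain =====

-- B replaces A's count table + second pass by a single streaming pass with no counts:
-- a candidate list of digits seen one time plus a set of retired digits (objective: alternative).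

-- ===== PORT A =====
def find_non_repeating_numbers (s : String) : List String :=
  let count : PySem.Dict Char Int := s.toList.foldl (fun d c =>
    if PySem.Chars.isdigit c then
      if d.contains c then d.modify c 0 (· + 1) else d.insert c 1
    else d) PySem.Dict.empty
  -- 'for char in count' iterates the keys; 'count[char]' is exact as getD since char ∈ keys
  count.keys.foldl (fun acc c => if count.getD c 0 = 1 then acc ++ [String.ofList [c]] else acc) []

-- ===== PORT B =====
-- one step of B's loop body: st = (once, repeated)
def pvAltStep (st : List String × PySem.Set String) (c : Char) : List String × PySem.Set String :=
  let cs := String.ofList [c]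
  if PySem.Chars.isdigit c && !(PySem.Set.contains st.2 cs) then
    if st.1.contains cs then
      -- once.remove(c): guarded by the contains test, so remove? is some (getD is unreachable)
      ((PySem.List.remove? st.1 cs).getD st.1, PySem.Set.add st.2 cs)
    else (st.1 ++ [cs], st.2)
  else st

def find_non_repeating_numbers_alt (s : String) : List String :=
  (s.toList.foldl pvAltStep ([], PySem.Set.empty)).1

-- ===== PRECONDITION & SPEC =====
def Spec_find_non_repeating_numbers (s : String) (out : List String) : Prop := out = find_non_repeating_numbers_alt s
instance (s : String) (out : List String) : Decidable (Spec_find_non_repeating_numbers s out) := by unfold Spec_find_non_repeating_numbers; infer_instance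

-- ===== CLAIM (what is proved, stated in full; the proofs are below) =====
def Claim_equal_find_non_repeating_numbers : Prop := ∀ (s : String), Dom_find_non_repeating_numbers s → Spec_find_non_repeating_numbers s (find_non_repeating_numbers s)

-- ===== LEMMAS AND PROOFS =====

-- a guarded fold is a fold over the filtered list
theorem pv_foldl_guard {α β : Type} (p : α → Bool) (f : β → α → β) :
    ∀ (l : List α) (init : β),
      l.foldl (fun d c => if p c then f d c else d) init = (l.filter p).foldl f init := by
  intro l
  induction l with
  | nil => intro init; rfl
  | cons x t ih =>
    intro init
    by_cases hx : p x
    · simp [hx, ih]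
    · simp [hx, ih]

-- A's contains-guarded update step is exactly Counter's modify step
theorem pv_step_eq_modify (d : PySem.Dict Char Int) (c : Char) :
    (if d.contains c then d.modify c 0 (· + 1) else d.insert c 1) = d.modify c 0 (· + 1) := by
  by_cases h : d.contains c
  · simp [h]
  · simp only [h, Bool.false_eq_true, if_false, PySem.Dict.modify]
    rw [PySem.Dict.getD_of_not_contains (d := d) (k := c) (d0 := 0) (h := by simpa using h)]
    norm_num

-- Set.ofList-style folds append a subsequence
theorem pv_foldl_add_sublist {α : Type} [BEq α] :
    ∀ (l : List α) (s : PySem.Set α), ∃ t, l.foldl PySem.Set.add s = s ++ t ∧ t.Sublist l := by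
  intro l
  induction l with
  | nil => intro s; exact ⟨[], by simp, by simp⟩
  | cons x m ih =>
    intro s
    by_cases hx : List.contains s x = true
    · obtain ⟨t, ht, hs⟩ := ih s
      exact ⟨t, by simpa [List.foldl_cons, PySem.Set.add, hx] using ht, hs.cons x⟩
    · obtain ⟨t, ht, hs⟩ := ih (s ++ [x])
      exact ⟨x :: t, by simpa [List.foldl_cons, PySem.Set.add, hx] using ht, hs.cons₂ x⟩

theorem pv_ofList_sublist {α : Type} [BEq α] (l : List α) : (PySem.Set.ofList l).Sublist l := by
  obtain ⟨t, ht, hs⟩ := pv_foldl_add_sublist l PySem.Set.empty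
  simpa [PySem.Set.ofList, PySem.Set.empty] using ht ▸ hs

-- the "appears exactly once" filter of any list has no duplicates
theorem pv_filter_once_nodup (m : List Char) :
    (m.filter (fun c => m.count c == 1)).Nodup := by
  rw [List.nodup_iff_count_le_one]
  intro a
  by_cases hp : (m.count a == 1) = true
  · rw [List.count_filter (p := fun c => List.count c m == 1) hp]
    exact le_of_eq (by simpa using hp)
  · have hnm : a ∉ m.filter (fun c => m.count c == 1) := by
      intro hmem; exact hp (List.mem_filter.mp hmem).2
    simp [List.count_eq_zero.mpr hnm]

-- filtering the first-occurrence dedup by "count = 1" equals filtering the original list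
theorem pv_dedup_filter_once (m : List Char) :
    (PySem.Set.ofList m).filter (fun c => m.count c == 1)
      = m.filter (fun c => m.count c == 1) := by
  have hsub : ((PySem.Set.ofList m).filter (fun c => m.count c == 1)).Sublist
      (m.filter (fun c => m.count c == 1)) :=
    (pv_ofList_sublist m).filter _
  have hsubset : (m.filter (fun c => m.count c == 1)) ⊆
      ((PySem.Set.ofList m).filter (fun c => m.count c == 1)) := by
    intro a ha
    obtain ⟨h2, h1⟩ := List.mem_filter.mp ha
    exact List.mem_filter.mpr ⟨(PySem.Set.mem_ofList m a).mpr h2, h1⟩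
  exact hsub.eq_of_length (le_antisymm hsub.length_le
    (((pv_filter_once_nodup m).subperm hsubset).length_le))

-- Prop-condition variant of the append-if loop shape (used for A's second loop)
theorem pv_foldl_append_ite {α β : Type} (p : α → Prop) [DecidablePred p] (f : α → β)
    (l : List α) (acc : List β) :
    l.foldl (fun acc x => if p x then acc ++ [f x] else acc) acc
      = acc ++ (l.filter (fun x => decide (p x))).map f := by
  have h : (fun (acc : List β) x => if p x then acc ++ [f x] else acc)
      = (fun acc x => if (fun x => decide (p x)) x = true then acc ++ [f x] else acc) := by
    funext acc x; simp
  rw [h, PySem.List.foldl_append_if]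

-- the char → singleton-string embedding is injective
theorem pv_single_inj : Function.Injective (fun c : Char => String.ofList [c]) := by
  intro a b h
  have := congrArg String.toList h
  simpa using this

-- B's loop invariant: after any prefix p, the candidate list is exactly the count-1 filter
-- of the digits of p (mapped to strings), and the retired set holds the digits of count ≥ 2.
theorem pv_alt_invariant : ∀ (p : List Char),
    (p.foldl pvAltStep ([], PySem.Set.empty)).1
      = ((p.filter PySem.Chars.isdigit).filter
          (fun c => (p.filter PySem.Chars.isdigit).count c == 1)).map
            (fun c => String.ofList [c])
    ∧ ∀ x : Char,
        (PySem.Set.contains (p.foldl pvAltStep ([], PySem.Set.empty)).2 (String.ofList [x]) = true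
          ↔ 2 ≤ (p.filter PySem.Chars.isdigit).count x) := by
  intro p
  induction p using List.reverseRecOn with
  | nil => constructor
           · rfl
           · intro x; simp [PySem.Set.empty, PySem.Set.contains]
  | append_singleton p c ih =>
    obtain ⟨h1, h2⟩ := ih
    rw [List.foldl_append, List.foldl_cons, List.foldl_nil]
    set st := p.foldl pvAltStep ([], PySem.Set.empty) with hst
    set L := p.filter PySem.Chars.isdigit with hL
    by_cases hd : PySem.Chars.isdigit c
    · have hL' : (p ++ [c]).filter PySem.Chars.isdigit = L ++ [c] := by
        simp [List.filter_append, hd, hL]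
      have hcount : ∀ x : Char, (L ++ [c]).count x = L.count x + (if x = c then 1 else 0) := by
        intro x
        by_cases hx : x = c
        · simp [List.count_append, hx]
        · have hcx : ¬c = x := fun h => hx h.symm
          simp [List.count_append, hx, hcx]
      by_cases hrep : 2 ≤ L.count c
      · -- already repeated: step is a no-op
        have hcontains : PySem.Set.contains st.2 (String.ofList [c]) = true := (h2 c).mpr hrep
        have hstep : pvAltStep st c = st := by
          simp only [pvAltStep, hcontains, hd, Bool.not_true, Bool.and_false,
            Bool.false_eq_true, if_false]
        rw [hstep, hL']
        constructor
        · rw [h1]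
          congr 1
          rw [List.filter_append]
          have htail : [c].filter (fun x => (L ++ [c]).count x == 1) = [] := by
            simp [hcount]; omega
          rw [htail, List.append_nil]
          apply List.filter_congr
          intro x hx
          by_cases hxc : x = c
          · subst hxc
            simp [hcount]
            omega
          · simp [hcount, hxc]
        · intro x
          rw [h2 x, hcount]
          by_cases hxc : x = c
          · subst hxc
            omega
          · simp [hxc]
      · have hcontains : PySem.Set.contains st.2 (String.ofList [c]) = false := by
          cases hcase : PySem.Set.contains st.2 (String.ofList [c]) with
          | false => rfl
          | true => exact absurd ((h2 c).mp hcase) hrep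
        by_cases h1k : L.count c = 1
        · -- second sighting: remove from once, add to repeated
          have hmemL : c ∈ L.filter (fun x => L.count x == 1) :=
            List.mem_filter.mpr ⟨List.count_pos_iff.mp (by omega), by simp [h1k]⟩
          have hmem : String.ofList [c] ∈ st.1 := by
            rw [h1]; exact List.mem_map.mpr ⟨c, hmemL, rfl⟩
          have hconto : st.1.contains (String.ofList [c]) = true := by
            simpa using hmem
          have hstep : pvAltStep st c
              = ((PySem.List.remove? st.1 (String.ofList [c])).getD st.1,
                 PySem.Set.add st.2 (String.ofList [c])) := by
            simp only [pvAltStep, hcontains, hd, hconto, Bool.not_false, Bool.and_true,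
              if_true]
          rw [hstep, hL']
          dsimp only
          constructor
          · rw [PySem.List.remove?_eq_some_erase (h := hmem), Option.getD_some, h1]
            rw [← List.map_erase pv_single_inj]
            congr 1
            rw [List.filter_append]
            have htail : [c].filter (fun x => (L ++ [c]).count x == 1) = [] := by
              simp [hcount, h1k]
            rw [htail, List.append_nil]
            rw [(pv_filter_once_nodup L).erase_eq_filter, List.filter_filter]
            apply List.filter_congr
            intro x hx
            by_cases hxc : x = c
            · subst hxc; simp [hcount, h1k]
            · simp [hcount, hxc]
          · intro x
            have : (String.ofList [x] ∈ PySem.Set.add st.2 (String.ofList [c]))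
                ↔ String.ofList [x] ∈ st.2 ∨ String.ofList [x] = String.ofList [c] :=
              PySem.Set.mem_add st.2 (String.ofList [c]) (String.ofList [x])
            rw [PySem.Set.contains_iff, this, ← PySem.Set.contains_iff, h2 x, hcount]
            by_cases hxc : x = c
            · subst hxc; simp [h1k]
            · have hne : String.ofList [x] ≠ String.ofList [c] := fun h => hxc (pv_single_inj h)
              simp [hxc, hne]
        · -- first sighting: append to once
          have hk0 : L.count c = 0 := by omega
          have hnotL : c ∉ L := by
            intro hmem
            exact absurd (List.count_pos_iff.mpr hmem) (by omega)
          have hnotF : c ∉ L.filter (fun x => L.count x == 1) := fun h => hnotL (List.mem_filter.mp h).1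
          have hconto : st.1.contains (String.ofList [c]) = false := by
            rw [h1]
            simp only [List.contains_eq_mem, decide_eq_false_iff_not]
            intro hmem
            obtain ⟨y, hy, hye⟩ := List.mem_map.mp hmem
            exact hnotF (pv_single_inj hye ▸ hy)
          have hstep : pvAltStep st c = (st.1 ++ [String.ofList [c]], st.2) := by
            simp only [pvAltStep, hcontains, hd, hconto, Bool.not_false, Bool.and_true,
              if_true, Bool.false_eq_true, if_false]
          rw [hstep, hL']
          dsimp only
          constructor
          · rw [h1]
            rw [List.filter_append]
            have htail : [c].filter (fun x => (L ++ [c]).count x == 1) = [c] := by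
              simp [hcount, hk0]
            rw [htail]
            rw [List.map_append]
            congr 1
            exact congrArg _ (List.filter_congr (fun x hx => by
              have hxc : ¬x = c := fun h => hnotL (h ▸ hx)
              simp [hcount, hxc]))
          · intro x
            rw [h2 x, hcount]
            by_cases hxc : x = c
            · subst hxc; simp [hk0]
            · simp [hxc]
    · -- not a digit: step is a no-op and the digit list is unchanged
      have hstep : pvAltStep st c = st := by
        simp only [pvAltStep, hd, Bool.false_and, Bool.false_eq_true, if_false]
      have hL' : (p ++ [c]).filter PySem.Chars.isdigit = L := by
        simp [List.filter_append, hd, hL]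
      rw [hstep, hL']
      exact ⟨h1, h2⟩

-- ===== VERDICT (by name: the statement is the Claim_ definition above) =====
theorem find_non_repeating_numbers_spec : Claim_equal_find_non_repeating_numbers := by
  intro s _
  unfold Spec_find_non_repeating_numbers find_non_repeating_numbers find_non_repeating_numbers_alt
  rw [pv_foldl_guard]
  simp only [pv_step_eq_modify]
  rw [← PySem.Dict.counter_eq_foldl]
  rw [pv_foldl_append_ite]
  simp only [PySem.Dict.keys_counter, PySem.Dict.getD_counter, List.nil_append]
  have hA : ((PySem.Set.ofList (s.toList.filter PySem.Chars.isdigit)).filter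
      (fun c => decide ((((s.toList.filter PySem.Chars.isdigit).count c : Int)) = 1)))
      = (PySem.Set.ofList (s.toList.filter PySem.Chars.isdigit)).filter
        (fun c => (s.toList.filter PySem.Chars.isdigit).count c == 1) := by
    apply List.filter_congr; intro x _
    simp only [Nat.cast_eq_one]
    exact Eq.symm (Bool.beq_eq_decide_eq _ 1)
  rw [hA, pv_dedup_filter_once]
  exact ((pv_alt_invariant s.toList).1).symm
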